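-- pv_equiv track=rewrite | github.com/Treyu2023/Sticky_Note_Compiler | scripts/data_extractor.py | _extract_text_from_rtf
-- ===== SOURCE A (Python) =====
-- def _extract_text_from_rtf(rtf_content: str) -> str:
--     """Extract plain text from RTF content."""
--     # Simple RTF parser - for complex RTF might need a dedicated library
--     result = []
--     in_control = False
--     skip_next = False
--
--     for char in rtf_content:
--         if skip_next:
--             skip_next = False
--             continue
--
--         if char == '\\':
--             in_control = True
--             continue
--
--         if in_control:
--             if char.isalpha():
--                 continue
--             else:
--                 in_control = False
--
--         if not in_control and char != '{' and char != '}':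
--             result.append(char)
--
--     return ''.join(result).strip()
-- ===== SOURCE B (Python) =====
-- def _extract_text_from_rtf(rtf_content: str) -> str:
--     """Extract plain text from RTF content (split-based re-implementation)."""
--     segments = rtf_content.split('\\')
--     pieces = [segments[0]]
--     for seg in segments[1:]:
--         pieces.append(_after_control_word(seg))
--     text = ''.join(pieces)
--     return text.replace('{', '').replace('}', '').strip()
--
-- def _after_control_word(seg: str) -> str:
--     # drop the leading run of alphabetic characters (the RTF control word)
--     i = 0
--     n = len(seg)
--     while i < n and seg[i].isalpha():
--         i += 1
--     return seg[i:]
-- ===== Notes on version B (the rewrite author's own statement) =====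
-- stated objective: alternative
-- what changed: Replaces A's character-by-character state machine (in_control/skip_next flags) with a split on '\': segment 0 is kept verbatim, each later segment has its leading alphabetic control word dropped, then braces are filtered out and the result stripped.
import Mathlib
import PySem

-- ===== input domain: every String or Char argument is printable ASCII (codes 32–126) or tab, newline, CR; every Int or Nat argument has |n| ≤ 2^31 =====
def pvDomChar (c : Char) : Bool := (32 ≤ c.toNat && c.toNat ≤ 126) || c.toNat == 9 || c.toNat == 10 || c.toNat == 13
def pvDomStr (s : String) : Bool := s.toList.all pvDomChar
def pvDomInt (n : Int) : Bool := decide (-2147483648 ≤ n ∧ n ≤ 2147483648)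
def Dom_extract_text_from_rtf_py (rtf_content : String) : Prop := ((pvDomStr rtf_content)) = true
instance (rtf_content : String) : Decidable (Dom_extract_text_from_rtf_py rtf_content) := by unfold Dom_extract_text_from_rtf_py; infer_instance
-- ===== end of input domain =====

-- B replaces A's character-by-character state machine by a split on '\': segment 0 is
-- literal, each later segment loses its leading alphabetic control word; same asymptotic
-- cost, different decomposition (objective: alternative; a timing run measured B faster).

-- ===== PORT A =====
-- one step of A's for-loop; state = (result, in_control, skip_next)
def pvAStep (st : List Char × Bool × Bool) (c : Char) : List Char × Bool × Bool :=
  let (result, in_control, skip_next) := st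
  if skip_next then (result, in_control, false)
  else if c = '\\' then (result, true, skip_next)
  else if in_control && PySem.Chars.isalpha c then (result, in_control, skip_next)
  else if c ≠ '{' && c ≠ '}' then (result ++ [c], false, skip_next)
  else (result, false, skip_next)

def extract_text_from_rtf_py (rtf_content : String) : String :=
  let st := rtf_content.toList.foldl pvAStep ([], false, false)
  String.ofList (PySem.Chars.strip st.1)

-- ===== PORT B =====
-- _after_control_word: advance past the leading run of alphabetic characters, keep the rest
def pvAfterControlWord : List Char → List Char
  | [] => []
  | c :: cs => if PySem.Chars.isalpha c then pvAfterControlWord cs else c :: cs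

def extract_text_from_rtf_py_alt (rtf_content : String) : String :=
  match PySem.Chars.splitOn rtf_content.toList ['\\'] with
  | [] => ""  -- unreachable: str.split always yields at least one piece
  | seg0 :: rest =>
    let text := seg0 ++ (rest.map pvAfterControlWord).flatten
    String.ofList (PySem.Chars.strip (text.filter (fun ch => ch ≠ '{' && ch ≠ '}')))

-- ===== PRECONDITION & SPEC =====
def Spec_extract_text_from_rtf_py (rtf_content : String) (out : String) : Prop := out = extract_text_from_rtf_py_alt rtf_content
instance (rtf_content : String) (out : String) : Decidable (Spec_extract_text_from_rtf_py rtf_content out) := by unfold Spec_extract_text_from_rtf_py; infer_instance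

-- ===== CLAIM (what is proved, stated in full; the proofs are below) =====
def Claim_equal_extract_text_from_rtf_py : Prop := ∀ (rtf_content : String), Dom_extract_text_from_rtf_py rtf_content → Spec_extract_text_from_rtf_py rtf_content (extract_text_from_rtf_py rtf_content)

-- ===== LEMMAS AND PROOFS =====

-- simple recursive characterization of s.split('\')
def sp1 : List Char → List (List Char)
  | [] => [[]]
  | c :: cs =>
    if c = '\\' then [] :: sp1 cs
    else match sp1 cs with
      | [] => [[c]]
      | h :: t => (c :: h) :: t

lemma sp1_ne_nil (cs : List Char) : sp1 cs ≠ [] := by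
  cases cs with
  | nil => simp [sp1]
  | cons c cs => simp only [sp1]; split <;> [skip; split] <;> simp

lemma go_inv : ∀ (fuel : Nat) (l cur : List Char) (acc : List (List Char)), l.length ≤ fuel →
    PySem.Chars.splitOn.go ['\\'] fuel l cur acc =
      acc.reverse ++ (match sp1 l with
        | [] => [cur.reverse]
        | h :: t => (cur.reverse ++ h) :: t) := by
  intro fuel
  induction fuel with
  | zero =>
    intro l cur acc h
    have : l = [] := by cases l <;> simp_all
    subst this
    simp [PySem.Chars.splitOn.go, sp1]
  | succ fuel ih =>
    intro l cur acc h
    cases l with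
    | nil => simp [PySem.Chars.splitOn.go, sp1]
    | cons c rest =>
      rw [PySem.Chars.splitOn.go]
      by_cases hc : c = '\\'
      · subst hc
        simp only [List.isPrefixOf, beq_self_eq_true, Bool.true_and, if_true]
        simp only [List.length_cons, List.length_nil, List.drop_succ_cons, List.drop_zero]
        rw [ih rest [] (cur.reverse :: acc) (by simpa using Nat.le_of_succ_le_succ h)]
        simp only [sp1, if_true]
        cases hs : sp1 rest with
        | nil => exact absurd hs (sp1_ne_nil rest)
        | cons h t => simp
      · have : (['\\'].isPrefixOf (c :: rest)) = false := by
          simp [List.isPrefixOf]; exact fun hh => absurd hh.symm hc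
        rw [if_neg (by simp [this])]
        rw [ih rest (c :: cur) acc (by simpa using Nat.le_of_succ_le_succ h)]
        simp only [sp1, if_neg hc]
        cases hs : sp1 rest with
        | nil => exact absurd hs (sp1_ne_nil rest)
        | cons h t => simp

lemma splitOn_eq_sp1 (cs : List Char) : PySem.Chars.splitOn cs ['\\'] = sp1 cs := by
  rw [PySem.Chars.splitOn, go_inv (cs.length + 1) cs [] [] (Nat.le_succ _)]
  cases hs : sp1 cs with
  | nil => exact absurd hs (sp1_ne_nil cs)
  | cons h t => simp

-- B's text before brace removal, in two modes: Rv = normal text, RvC = inside a control word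
def Rv (cs : List Char) : List Char :=
  match sp1 cs with
  | [] => []
  | seg0 :: rest => seg0 ++ (rest.map pvAfterControlWord).flatten

def RvC (cs : List Char) : List Char :=
  ((sp1 cs).map pvAfterControlWord).flatten

lemma Rv_nil : Rv [] = [] := by simp [Rv, sp1]
lemma RvC_nil : RvC [] = [] := by simp [RvC, sp1, pvAfterControlWord]

lemma Rv_cons (c : Char) (cs : List Char) :
    Rv (c :: cs) = if c = '\\' then RvC cs else c :: Rv cs := by
  by_cases hc : c = '\\'
  · subst hc; simp [Rv, RvC, sp1]
  · simp only [Rv, sp1, if_neg hc]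
    cases hs : sp1 cs with
    | nil => exact absurd hs (sp1_ne_nil cs)
    | cons h t => simp

lemma RvC_cons (c : Char) (cs : List Char) :
    RvC (c :: cs) = if c = '\\' then RvC cs
      else if PySem.Chars.isalpha c then RvC cs else c :: Rv cs := by
  by_cases hc : c = '\\'
  · subst hc; simp [RvC, sp1, pvAfterControlWord]
  · simp only [RvC, sp1, if_neg hc]
    cases hs : sp1 cs with
    | nil => exact absurd hs (sp1_ne_nil cs)
    | cons h t =>
      by_cases ha : PySem.Chars.isalpha c
      · simp [pvAfterControlWord, ha]
      · simp [pvAfterControlWord, ha, Rv, hs]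

def pvBrace (ch : Char) : Bool := ch ≠ '{' && ch ≠ '}'

-- invariant of A's loop, in both modes
lemma step_bs (acc : List Char) (ic : Bool) :
    pvAStep (acc, ic, false) '\\' = (acc, true, false) := by
  simp [pvAStep]

lemma step_plain (acc : List Char) (c : Char) (hc : c ≠ '\\') :
    pvAStep (acc, false, false) c =
      if pvBrace c then (acc ++ [c], false, false) else (acc, false, false) := by
  simp only [pvAStep, pvBrace, Bool.false_eq_true, if_false, if_neg hc, Bool.false_and]
  rfl

lemma step_ctl (acc : List Char) (c : Char) (hc : c ≠ '\\') (ha : PySem.Chars.isalpha c = true) :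
    pvAStep (acc, true, false) c = (acc, true, false) := by
  simp [pvAStep, hc, ha]

lemma step_ctl_end (acc : List Char) (c : Char) (hc : c ≠ '\\') (ha : PySem.Chars.isalpha c = false) :
    pvAStep (acc, true, false) c =
      if pvBrace c then (acc ++ [c], false, false) else (acc, false, false) := by
  simp only [pvAStep, pvBrace, Bool.false_eq_true, if_false, if_neg hc, ha, Bool.true_and]
  rfl

lemma fold_inv : ∀ (cs : List Char) (acc : List Char),
    (cs.foldl pvAStep (acc, false, false)).1 = acc ++ (Rv cs).filter pvBrace ∧
    (cs.foldl pvAStep (acc, true, false)).1 = acc ++ (RvC cs).filter pvBrace := by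
  intro cs
  induction cs with
  | nil => intro acc; simp [Rv_nil, RvC_nil]
  | cons c cs ih =>
    intro acc
    constructor
    · rw [List.foldl_cons, Rv_cons]
      by_cases hc : c = '\\'
      · subst hc; rw [step_bs, if_pos rfl]; exact (ih acc).2
      · rw [step_plain acc c hc, if_neg hc]
        by_cases hb : pvBrace c
        · rw [if_pos hb, (ih (acc ++ [c])).1, List.filter_cons, if_pos hb]
          simp
        · rw [if_neg hb, (ih acc).1, List.filter_cons,
            if_neg (by simpa using hb)]
    · rw [List.foldl_cons, RvC_cons]
      by_cases hc : c = '\\'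
      · subst hc; rw [step_bs, if_pos rfl]; exact (ih acc).2
      · rw [if_neg hc]
        by_cases ha : PySem.Chars.isalpha c
        · rw [step_ctl acc c hc ha, if_pos ha]; exact (ih acc).2
        · rw [step_ctl_end acc c hc (by simpa using ha), if_neg ha]
          by_cases hb : pvBrace c
          · rw [if_pos hb, (ih (acc ++ [c])).1, List.filter_cons, if_pos hb]
            simp
          · rw [if_neg hb, (ih acc).1, List.filter_cons,
              if_neg (by simpa using hb)]

-- ===== VERDICT (by name: the statement is the Claim_ definition above) =====
theorem extract_text_from_rtf_py_spec : Claim_equal_extract_text_from_rtf_py := by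
  intro s _
  unfold Spec_extract_text_from_rtf_py extract_text_from_rtf_py extract_text_from_rtf_py_alt
  rw [splitOn_eq_sp1]
  cases hs : sp1 s.toList with
  | nil => exact absurd hs (sp1_ne_nil s.toList)
  | cons seg0 rest =>
    have h := (fold_inv s.toList []).1
    simp only [List.nil_append] at h
    simp only [h, Rv, hs]
    rfl
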